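-- pv_equiv track=rewrite | github.com/emili5/pythonProject_basic | part05_function/practice.py | change1
-- ===== SOURCE A (Python) =====
-- def change1(phone_number):
--     arr = []                                 # 문자열 -> 리스트
--     for i in range(len(phone_number)):      # 문자열의 각 문자의 인덱스에 접근
--         if i==3 or i==7:
--             arr.append('-')
--         arr.append(phone_number[i])
--     result = ''                             # 리스트 -> 문자열
--     for i in arr:
--         result+=i
--     return result
-- ===== SOURCE B (Python) =====
-- def change1(phone_number):
--     result = ''.join(phone_number[:3])
--     if len(phone_number) > 3:
--         result += '-' + ''.join(phone_number[3:7])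
--     if len(phone_number) > 7:
--         result += '-' + ''.join(phone_number[7:])
--     return result
-- ===== Notes on version B (the rewrite author's own statement) =====
-- stated objective: simpler
-- what changed: Replaces the per-character index loop (hyphens inserted at indices 3 and 7 into an intermediate list, then a second char-by-char concatenation loop) by three direct slices joined with hyphens under length guards; slicing avoids both per-character loops, a measured constant-factor speedup.
import Mathlib
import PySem

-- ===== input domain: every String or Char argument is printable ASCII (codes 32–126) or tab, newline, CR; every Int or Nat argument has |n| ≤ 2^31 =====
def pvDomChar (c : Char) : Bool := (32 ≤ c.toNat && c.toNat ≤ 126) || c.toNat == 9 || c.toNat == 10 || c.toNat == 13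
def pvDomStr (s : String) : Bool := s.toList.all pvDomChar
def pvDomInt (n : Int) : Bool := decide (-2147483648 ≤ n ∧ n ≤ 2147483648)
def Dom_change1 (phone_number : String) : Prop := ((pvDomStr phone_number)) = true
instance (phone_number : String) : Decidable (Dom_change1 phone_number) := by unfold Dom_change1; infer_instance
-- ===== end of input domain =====

-- B replaces A's per-character index loop by three slices joined with hyphens (simpler decomposition).

-- ===== PORT A =====
def change1 (phone_number : String) : String :=
  let l := phone_number.toList
  -- arr = []; for i in range(len(phone_number)): if i==3 or i==7: arr.append('-'); arr.append(phone_number[i])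
  let arr : List Char :=
    (PySem.List.pyRange 0 (PySem.List.len l) 1).foldl
      (fun arr i =>
        let arr := if i = 3 ∨ i = 7 then arr ++ ['-'] else arr
        -- every i produced by the range is a valid index, so pyGetD's default is never used
        arr ++ [PySem.List.pyGetD l i ' ']) []
  -- result = ''; for i in arr: result += i
  let result : List Char := arr.foldl (fun result c => result ++ [c]) []
  String.ofList result

-- ===== PORT B =====
def change1_alt (phone_number : String) : String :=
  let l := phone_number.toList
  let res := PySem.List.slice l (some 0) (some 3)
  let res := if 3 < PySem.List.len l
    then res ++ '-' :: PySem.List.slice l (some 3) (some 7) else res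
  let res := if 7 < PySem.List.len l
    then res ++ '-' :: PySem.List.slice l (some 7) none else res
  String.ofList res

-- ===== PRECONDITION & SPEC =====
def Spec_change1 (phone_number : String) (out : String) : Prop := out = change1_alt phone_number
instance (phone_number : String) (out : String) : Decidable (Spec_change1 phone_number out) := by unfold Spec_change1; infer_instance

-- ===== CLAIM (what is proved, stated in full; the proofs are below) =====
def Claim_equal_change1 : Prop := ∀ (phone_number : String), Dom_change1 phone_number → Spec_change1 phone_number (change1 phone_number)

-- ===== LEMMAS AND PROOFS =====

-- the common value both ports build: take/drop normal form
def pvSpec (l : List Char) : List Char :=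
  l.take 3
    ++ (if 3 < l.length then '-' :: (l.drop 3).take 4 else [])
    ++ (if 7 < l.length then '-' :: l.drop 7 else [])

theorem pvSpec_snoc (t : List Char) (c : Char) :
    pvSpec (t ++ [c]) =
      (if t.length = 3 ∨ t.length = 7 then pvSpec t ++ ['-'] else pvSpec t) ++ [c] := by
  unfold pvSpec
  rcases Nat.lt_or_ge t.length 3 with h3 | h3
  · have e1 : (t ++ [c]).take 3 = t ++ [c] := List.take_of_length_le (by simp; omega)
    have e2 : t.take 3 = t := List.take_of_length_le (by omega)
    simp [e1, e2, show ¬ 3 < t.length + 1 by omega, show ¬ 7 < t.length + 1 by omega,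
      show ¬ 3 < t.length by omega, show ¬ 7 < t.length by omega,
      show t.length ≠ 3 by omega, show t.length ≠ 7 by omega]
  · have e1 : (t ++ [c]).take 3 = t.take 3 := List.take_append_of_le_length h3
    have hd3 : (t ++ [c]).drop 3 = t.drop 3 ++ [c] := List.drop_append_of_le_length h3
    rcases Nat.lt_or_ge t.length 7 with h7 | h7
    · by_cases he : t.length = 3
      · have e2 : t.take 3 = t := List.take_of_length_le (by omega)
        have e3 : t.drop 3 = [] := List.drop_of_length_le (by omega)
        simp [e1, e2, e3, hd3, he]
      · have e4 : (t.drop 3 ++ [c]).take 4 = t.drop 3 ++ [c] :=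
          List.take_of_length_le (by simp; omega)
        have e5 : (t.drop 3).take 4 = t.drop 3 := List.take_of_length_le (by simp; omega)
        simp [e1, hd3, e4, e5, show 3 < t.length + 1 by omega,
          show ¬ 7 < t.length + 1 by omega, show 3 < t.length by omega,
          show ¬ 7 < t.length by omega, show t.length ≠ 3 by omega,
          show t.length ≠ 7 by omega]
    · by_cases he : t.length = 7
      · have hd7 : (t ++ [c]).drop 7 = t.drop 7 ++ [c] :=
          List.drop_append_of_le_length (by omega)
        have e3 : t.drop 7 = [] := List.drop_of_length_le (by omega)
        have e4 : (t.drop 3 ++ [c]).take 4 = t.drop 3 := by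
          rw [List.take_append_of_le_length (by simp [he])]
          exact List.take_of_length_le (by simp [he])
        have e5 : (t.drop 3).take 4 = t.drop 3 := List.take_of_length_le (by simp [he])
        simp [e1, hd3, hd7, e3, e4, e5, he]
      · have hd7 : (t ++ [c]).drop 7 = t.drop 7 ++ [c] :=
          List.drop_append_of_le_length (by omega)
        have e4 : (t.drop 3 ++ [c]).take 4 = (t.drop 3).take 4 :=
          List.take_append_of_le_length (by simp; omega)
        simp [e1, hd3, hd7, e4, show 3 < t.length + 1 by omega,
          show 7 < t.length + 1 by omega, show 3 < t.length by omega,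
          show 7 < t.length by omega, show t.length ≠ 3 by omega,
          show t.length ≠ 7 by omega]

-- A's first loop, cut at index n, builds pvSpec of the first n characters
theorem coreA_eq (l : List Char) (n : Nat) (h : n ≤ l.length) :
    (PySem.List.pyRange 0 (n : Int) 1).foldl
      (fun arr i =>
        (if i = 3 ∨ i = 7 then arr ++ ['-'] else arr) ++ [PySem.List.pyGetD l i ' ']) []
      = pvSpec (l.take n) := by
  induction n with
  | zero => simp [PySem.List.pyRange_one_eq_nil (le_refl 0), pvSpec]
  | succ n ih =>
    have hle : (0:Int) ≤ (n:Int) := by positivity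
    rw [show ((n+1 : Nat) : Int) = (n : Int) + 1 by push_cast; ring,
      PySem.List.pyRange_one_succ_right hle, List.foldl_append, ih (by omega)]
    have hget : PySem.List.pyGetD l (n : Int) ' ' = l[n]'(by omega) := by
      rw [PySem.List.pyGetD_natCast]
      exact List.getD_eq_getElem _ _ (by omega)
    have htake : l.take (n+1) = l.take n ++ [l[n]'(by omega)] := by
      rw [List.take_add_one, List.getElem?_eq_getElem (by omega : n < l.length)]
      rfl
    rw [htake, pvSpec_snoc]
    simp only [List.foldl_cons, List.foldl_nil, hget, List.length_take]
    have hiff : ((n : Int) = 3 ∨ (n : Int) = 7) ↔ (min n l.length = 3 ∨ min n l.length = 7) := by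
      omega
    rcases Decidable.em ((n : Int) = 3 ∨ (n : Int) = 7) with hc | hc
    · rw [if_pos hc, if_pos (hiff.mp hc)]
    · rw [if_neg hc, if_neg (fun hh => hc (hiff.mpr hh))]

theorem altB_eq (l : List Char) :
    (if 7 < (l.length : Int) then
      (if 3 < (l.length : Int) then
          PySem.List.slice l (some 0) (some 3) ++ '-' :: PySem.List.slice l (some 3) (some 7)
        else PySem.List.slice l (some 0) (some 3)) ++ '-' :: PySem.List.slice l (some 7) none
    else
      if 3 < (l.length : Int) then
        PySem.List.slice l (some 0) (some 3) ++ '-' :: PySem.List.slice l (some 3) (some 7)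
      else PySem.List.slice l (some 0) (some 3)) = pvSpec l := by
  have s1 : PySem.List.slice l (some 0) (some 3) = l.take 3 := by
    rw [PySem.List.slice_zero_start, PySem.List.slice_to l (by norm_num)]; rfl
  have s2 : PySem.List.slice l (some 3) (some 7) = (l.drop 3).take 4 := by
    rw [PySem.List.slice_toNat l (by norm_num) (by norm_num)]; rfl
  have s3 : PySem.List.slice l (some 7) none = l.drop 7 := by
    rw [PySem.List.slice_from l (by norm_num)]; rfl
  have c3 : ((3:Int) < (l.length : Int)) = (3 < l.length) := by
    simp only [eq_iff_iff]; exact_mod_cast Iff.rfl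
  have c7 : ((7:Int) < (l.length : Int)) = (7 < l.length) := by
    simp only [eq_iff_iff]; exact_mod_cast Iff.rfl
  simp only [s1, s2, s3, c3, c7, pvSpec]
  rcases Nat.lt_or_ge 3 l.length with h3 | h3
  · rcases Nat.lt_or_ge 7 l.length with h7 | h7
    · simp [h3, h7]
    · simp [h3, Nat.not_lt.mpr h7]
  · simp [Nat.not_lt.mpr h3, show ¬ 7 < l.length by omega]

-- ===== VERDICT (by name: the statement is the Claim_ definition above) =====
theorem change1_spec : Claim_equal_change1 := by
  intro s _
  unfold Spec_change1 change1 change1_alt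
  simp only [PySem.List.len_eq, PySem.List.foldl_append_singleton_eq_self, List.nil_append]
  rw [coreA_eq s.toList s.toList.length le_rfl, List.take_length]
  exact congrArg String.ofList (altB_eq s.toList).symm
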